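-- pv_equiv track=rewrite | github.com/brahma2024/The-Agentic-Ledger | src/subtitle_generator.py | _wrap_karaoke_words
-- ===== SOURCE A (Python) =====
-- MAX_VISIBLE_CHARS_PER_LINE = 50
--
-- def _wrap_karaoke_words(
--     kf_words: list[tuple[int, str]]
-- ) -> list[str]:
--     """
--     Wrap karaoke-tagged words into lines.
--
--     Only counts visible characters (not {\\kf...} tags) toward the
--     line-length limit.
--
--     Args:
--         kf_words: List of (duration_cs, word_text) tuples
--
--     Returns:
--         List of line strings with {\\kf} tags and space separators
--     """
--     lines = []
--     current_line_parts: list[str] = []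
--     current_visible_len = 0
--
--     for duration_cs, word_text in kf_words:
--         word_visible_len = len(word_text)
--         # +1 for the space between words (if not first word on line)
--         needed = word_visible_len + (1 if current_line_parts else 0)
--
--         if current_visible_len + needed > MAX_VISIBLE_CHARS_PER_LINE and current_line_parts:
--             lines.append(" ".join(current_line_parts))
--             current_line_parts = []
--             current_visible_len = 0
--
--         tagged = f"{{\\kf{duration_cs}}}{word_text}"
--         current_line_parts.append(tagged)
--         current_visible_len += word_visible_len + (1 if len(current_line_parts) > 1 else 0)
--
--     if current_line_parts:
--         lines.append(" ".join(current_line_parts))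
--
--     return lines
-- ===== SOURCE B (Python) =====
-- MAX_VISIBLE_CHARS_PER_LINE = 50
--
-- def _wrap_karaoke_words(kf_words):
--     # Prefix sums c[k] = sum of (len(word)+1) over the first k words; a line of
--     # words s..e-1 has visible width c[e]-c[s]-1, so it fits iff c[e] <= c[s]+51.
--     n = len(kf_words)
--     c = [0] * (n + 1)
--     for i, (_, w) in enumerate(kf_words):
--         c[i + 1] = c[i] + len(w) + 1
--     lines = []
--     s = 0
--     while s < n:
--         # binary search: largest e in [s+1, n] with c[e] <= c[s] + 51
--         # (c is strictly increasing; e stays s+1 if even one word overflows)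
--         lo, hi = s + 1, n
--         while lo < hi:
--             mid = (lo + hi + 1) // 2
--             if c[mid] <= c[s] + 51:
--                 lo = mid
--             else:
--                 hi = mid - 1
--         e = lo
--         lines.append(" ".join(f"{{\\kf{d}}}{w}" for d, w in kf_words[s:e]))
--         s = e
--     return lines
-- ===== Notes on version B (the rewrite author's own statement) =====
-- stated objective: alternative
-- what changed: A accumulates lines word by word with running state (current parts, visible length); B precomputes prefix sums of visible widths and locates each line break with a hand-written binary search over them, then renders each slice.
import Mathlib
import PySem

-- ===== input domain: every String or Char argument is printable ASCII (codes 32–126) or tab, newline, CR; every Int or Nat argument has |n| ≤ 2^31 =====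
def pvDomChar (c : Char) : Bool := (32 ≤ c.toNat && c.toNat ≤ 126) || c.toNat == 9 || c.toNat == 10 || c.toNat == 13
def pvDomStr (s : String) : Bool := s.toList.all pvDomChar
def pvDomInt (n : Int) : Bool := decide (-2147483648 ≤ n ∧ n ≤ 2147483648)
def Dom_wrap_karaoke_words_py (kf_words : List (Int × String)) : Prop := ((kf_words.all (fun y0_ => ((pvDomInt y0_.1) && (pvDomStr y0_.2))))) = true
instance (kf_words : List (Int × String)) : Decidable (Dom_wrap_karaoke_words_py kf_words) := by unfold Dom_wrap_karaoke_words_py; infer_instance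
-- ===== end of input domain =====

-- B replaces A's stateful greedy accumulation with prefix sums of visible widths plus a
-- binary search locating each line break (objective: alternative algorithm, same cost);
-- return values proved equal everywhere.

-- ===== PORT A =====
-- loop body: state is (lines, current_line_parts, current_visible_len), tagging inline
def pvStepA (st : List String × List String × Int) (dw : Int × String) :
    List String × List String × Int :=
  let wlen := PySem.Str.len dw.2
  let needed := wlen + (if st.2.1 ≠ [] then 1 else 0)
  let st' : List String × List String × Int :=
    if st.2.2 + needed > 50 ∧ st.2.1 ≠ [] then
      (st.1 ++ [PySem.Str.join " " st.2.1], [], 0)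
    else st
  let tagged := "{\\kf" ++ PySem.Int.toStr dw.1 ++ "}" ++ dw.2
  let parts' := st'.2.1 ++ [tagged]
  (st'.1, parts', st'.2.2 + wlen + (if parts'.length > 1 then 1 else 0))

def wrap_karaoke_words_py (kf_words : List (Int × String)) : List String :=
  let st := kf_words.foldl pvStepA ([], [], 0)
  if st.2.1 ≠ [] then st.1 ++ [PySem.Str.join " " st.2.1] else st.1

-- ===== PORT B =====
-- c[k] = sum of (len(word)+1) over the first k words (the prefix-sum building loop)
def pvCList (kf_words : List (Int × String)) : List Int :=
  List.scanl (fun acc p => acc + (PySem.Str.len p.2 + 1)) 0 kf_words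

-- hand-written binary search of Source B, step for step; every index mid is within the
-- prefix-sum list (mid ≤ hi = len(kf_words) < len(c)), so c[mid] is ported as getD;
-- Python's (lo+hi+1)//2 on nonnegative ints is Nat division, exact here; the extra
-- fuel argument (first Nat; hi-lo supplied at the call site is always enough, since
-- hi-lo shrinks every iteration) only makes the while loop structurally recursive
def pvBsearch (c : List Int) (limit : Int) : Nat → Nat → Nat → Nat
  | 0, lo, _hi => lo
  | fuel + 1, lo, hi =>
    if lo < hi then
      if c.getD ((lo + hi + 1) / 2) 0 ≤ limit then
        pvBsearch c limit fuel ((lo + hi + 1) / 2) hi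
      else
        pvBsearch c limit fuel lo ((lo + hi + 1) / 2 - 1)
    else lo

-- the outer while-loop over s; kf_words[s:e] with 0 ≤ s ≤ e is exactly (drop s).take (e-s);
-- its fuel (one unit per emitted line; len(kf_words) at the call site is always enough,
-- since s grows by at least one word per line) again only makes it structural
def pvWrapFrom (kf : List (Int × String)) (c : List Int) : Nat → Nat → List String
  | 0, _s => []
  | fuel + 1, s =>
    if s < kf.length then
      PySem.Str.join " "
          (((kf.drop s).take
              (pvBsearch c (c.getD s 0 + 51) (kf.length - (s + 1)) (s + 1) kf.length - s)).map
            (fun p => "{\\kf" ++ PySem.Int.toStr p.1 ++ "}" ++ p.2))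
        :: pvWrapFrom kf c fuel (pvBsearch c (c.getD s 0 + 51) (kf.length - (s + 1)) (s + 1) kf.length)
    else []

def wrap_karaoke_words_py_alt (kf_words : List (Int × String)) : List String :=
  pvWrapFrom kf_words (pvCList kf_words) kf_words.length 0

-- ===== PRECONDITION & SPEC =====
def Spec_wrap_karaoke_words_py (kf_words : List (Int × String)) (out : List String) : Prop := out = wrap_karaoke_words_py_alt kf_words
instance (kf_words : List (Int × String)) (out : List String) : Decidable (Spec_wrap_karaoke_words_py kf_words out) := by unfold Spec_wrap_karaoke_words_py; infer_instance

-- ===== CLAIM (what is proved, stated in full; the proofs are below) =====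
def Claim_equal_wrap_karaoke_words_py : Prop := ∀ (kf_words : List (Int × String)), Dom_wrap_karaoke_words_py kf_words → Spec_wrap_karaoke_words_py kf_words (wrap_karaoke_words_py kf_words)

-- ===== LEMMAS AND PROOFS =====

def pvTag (p : Int × String) : String := "{\\kf" ++ PySem.Int.toStr p.1 ++ "}" ++ p.2

def pvFinish (st : List String × List String × Int) : List String :=
  if st.2.1 ≠ [] then st.1 ++ [PySem.Str.join " " st.2.1] else st.1

def pvC (kf : List (Int × String)) (k : Nat) : Int :=
  ((kf.map (fun p => PySem.Str.len p.2 + 1)).take k).sum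

-- A's loop body on the three kinds of states it meets
theorem pvStepA_first (L : List String) (dw : Int × String) :
    pvStepA (L, [], 0) dw = (L, [pvTag dw], PySem.Str.len dw.2) := by
  simp [pvStepA, pvTag]

theorem pvStepA_extend (L parts : List String) (vis : Int) (dw : Int × String)
    (hne : parts ≠ []) (hfit : vis + PySem.Str.len dw.2 + 1 ≤ 50) :
    pvStepA (L, parts, vis) dw = (L, parts ++ [pvTag dw], vis + PySem.Str.len dw.2 + 1) := by
  have hlen : 1 ≤ parts.length := List.length_pos_iff.mpr hne
  have hcond : ¬ (vis + (PySem.Str.len dw.2 + 1) > 50 ∧ parts ≠ []) := by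
    intro ⟨hgt, _⟩; omega
  have hlen2 : (parts ++ ["{\\kf" ++ PySem.Int.toStr dw.1 ++ "}" ++ dw.2]).length > 1 := by
    simp; omega
  simp only [pvStepA, if_pos hne, if_neg hcond, if_pos hlen2]
  simp [pvTag]

theorem pvStepA_flush (L parts : List String) (vis : Int) (dw : Int × String)
    (hne : parts ≠ []) (hover : 50 < vis + PySem.Str.len dw.2 + 1) :
    pvStepA (L, parts, vis) dw = (L ++ [PySem.Str.join " " parts], [pvTag dw], PySem.Str.len dw.2) := by
  have hcond : (vis + (PySem.Str.len dw.2 + 1) > 50 ∧ parts ≠ []) := ⟨by omega, hne⟩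
  simp only [pvStepA, if_pos hne, if_pos hcond]
  simp [pvTag]

theorem pvScanl_getD (l : List (Int × String)) :
    ∀ (a : Int) (k : Nat), k ≤ l.length →
      (List.scanl (fun acc p => acc + (PySem.Str.len p.2 + 1)) a l).getD k 0 = a + pvC l k := by
  induction l with
  | nil =>
    intro a k hk
    simp only [List.length_nil, Nat.le_zero] at hk
    subst hk
    simp [pvC]
  | cons x xs ih =>
    intro a k hk
    cases k with
    | zero => simp [pvC]
    | succ k =>
      simp only [List.scanl_cons, List.getD_cons_succ]
      rw [ih _ k (by simpa using hk)]
      simp [pvC, List.take_succ_cons]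
      ring

theorem pvCList_getD (kf : List (Int × String)) (k : Nat) (hk : k ≤ kf.length) :
    (pvCList kf).getD k 0 = pvC kf k := by
  simpa using pvScanl_getD kf 0 k hk

theorem pvC_succ (kf : List (Int × String)) (k : Nat) (hk : k < kf.length) :
    pvC kf (k + 1) = pvC kf k + (PySem.Str.len kf[k].2 + 1) := by
  unfold pvC
  rw [List.sum_take_succ _ k (by simpa using hk), List.getElem_map]

theorem pvC_le (kf : List (Int × String)) (i j : Nat) (hij : i ≤ j) (hj : j ≤ kf.length) :
    pvC kf i ≤ pvC kf j := by
  induction j, hij using Nat.le_induction with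
  | base => exact le_refl _
  | succ j hij ih =>
    have hjlt : j < kf.length := by omega
    have := ih (by omega)
    have hlen : (0:Int) ≤ PySem.Str.len kf[j].2 := by simp [PySem.Str.len_eq]
    rw [pvC_succ kf j hjlt]
    omega

theorem le_pvBsearch (c : List Int) (limit : Int) :
    ∀ (fuel lo hi : Nat), lo ≤ pvBsearch c limit fuel lo hi := by
  intro fuel
  induction fuel with
  | zero => intro lo hi; simp [pvBsearch]
  | succ fuel ih =>
    intro lo hi
    rw [pvBsearch]
    by_cases h : lo < hi
    · rw [if_pos h]
      by_cases hc : c.getD ((lo + hi + 1) / 2) 0 ≤ limit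
      · rw [if_pos hc]
        have := ih ((lo + hi + 1) / 2) hi
        omega
      · rw [if_neg hc]
        exact ih lo ((lo + hi + 1) / 2 - 1)
    · rw [if_neg h]

theorem pvBsearch_spec (c : List Int) (limit : Int) :
    ∀ (fuel lo hi : Nat), hi - lo ≤ fuel → lo ≤ hi →
    pvBsearch c limit fuel lo hi ≤ hi ∧
    (pvBsearch c limit fuel lo hi = lo ∨ c.getD (pvBsearch c limit fuel lo hi) 0 ≤ limit) ∧
    (pvBsearch c limit fuel lo hi = hi ∨ limit < c.getD (pvBsearch c limit fuel lo hi + 1) 0) := by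
  intro fuel
  induction fuel with
  | zero =>
    intro lo hi hf hle
    have heq : lo = hi := by omega
    subst heq
    simp [pvBsearch]
  | succ fuel ih =>
    intro lo hi hf hle
    rw [pvBsearch]
    by_cases h : lo < hi
    · rw [if_pos h]
      by_cases hc : c.getD ((lo + hi + 1) / 2) 0 ≤ limit
      · rw [if_pos hc]
        obtain ⟨h1, h2, h3⟩ := ih ((lo + hi + 1) / 2) hi (by omega) (by omega)
        refine ⟨h1, ?_, h3⟩
        rcases h2 with h2 | h2
        · right; rw [h2]; exact hc
        · right; exact h2
      · rw [if_neg hc]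
        obtain ⟨h1, h2, h3⟩ := ih lo ((lo + hi + 1) / 2 - 1) (by omega) (by omega)
        refine ⟨by omega, h2, ?_⟩
        rcases h3 with h3 | h3
        · right
          have heq : (lo + hi + 1) / 2 - 1 + 1 = (lo + hi + 1) / 2 := by omega
          rw [h3, heq]
          omega
        · right; exact h3
    · rw [if_neg h]
      exact ⟨by omega, Or.inl rfl, Or.inl (by omega)⟩

-- the slice kf[s:k] grows by one element at index k
theorem pvSeg_succ (kf : List (Int × String)) (s k : Nat) (hsk : s ≤ k) (hk : k < kf.length) :
    (kf.drop s).take (k + 1 - s) = (kf.drop s).take (k - s) ++ [kf[k]] := by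
  have h1 : k + 1 - s = (k - s) + 1 := by omega
  rw [h1, List.take_add_one]
  have h2 : (kf.drop s)[k - s]? = some kf[k] := by
    rw [List.getElem?_drop]
    have h3 : s + (k - s) = k := by omega
    rw [h3, List.getElem?_eq_getElem hk]
  rw [h2]
  rfl

theorem pvSeg_len (kf : List (Int × String)) (s k : Nat) (_hsk : s ≤ k) (hk : k ≤ kf.length) :
    ((kf.drop s).take (k - s)).length = k - s := by
  simp
  omega

theorem pvSeg_ne (kf : List (Int × String)) (s k : Nat) (hsk : s < k) (hk : k ≤ kf.length) :
    ((kf.drop s).take (k - s)).map pvTag ≠ [] := by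
  have hl := pvSeg_len kf s k (by omega) hk
  intro hcon
  have : (((kf.drop s).take (k - s)).map pvTag).length = 0 := by rw [hcon]; rfl
  simp at this
  omega

-- the inner accumulation: while every next word still fits, A keeps extending the line
theorem pvSeg2 (kf : List (Int × String)) (s : Nat) (L : List String) :
    ∀ (d k : Nat), s < k → k + d ≤ kf.length →
      (∀ j, k ≤ j → j < k + d → pvC kf (j + 1) ≤ pvC kf s + 51) →
      ((kf.drop k).take d).foldl pvStepA
          (L, ((kf.drop s).take (k - s)).map pvTag, pvC kf k - pvC kf s - 1)
        = (L, ((kf.drop s).take (k + d - s)).map pvTag, pvC kf (k + d) - pvC kf s - 1) := by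
  intro d
  induction d with
  | zero => intro k _ _ _; simp
  | succ d ih =>
    intro k hsk hkd hfit
    have hklt : k < kf.length := by omega
    rw [List.drop_eq_getElem_cons hklt, List.take_succ_cons, List.foldl_cons]
    have hparts := pvSeg_ne kf s k hsk (by omega)
    have hCk1 := pvC_succ kf k hklt
    have hfitk := hfit k (le_refl k) (by omega)
    rw [pvStepA_extend L _ _ _ hparts (by omega)]
    have hstate : (L, ((kf.drop s).take (k - s)).map pvTag ++ [pvTag kf[k]],
          pvC kf k - pvC kf s - 1 + PySem.Str.len kf[k].2 + 1)
        = (L, ((kf.drop s).take (k + 1 - s)).map pvTag, pvC kf (k + 1) - pvC kf s - 1) := by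
      rw [pvSeg_succ kf s k (by omega) hklt, List.map_append]
      simp only [List.map_cons, List.map_nil, Prod.mk.injEq]
      exact ⟨trivial, trivial, by omega⟩
    rw [hstate]
    have := ih (k + 1) (by omega) (by omega) (fun j hj1 hj2 => hfit j (by omega) (by omega))
    have harr : k + 1 + d = k + (d + 1) := by omega
    rw [harr] at this
    exact this

-- a full line: from a fresh state, A accumulates exactly the words s..e-1
theorem pvSegAll (kf : List (Int × String)) (s e : Nat) (L : List String)
    (hse : s < e) (hen : e ≤ kf.length)
    (hfit : ∀ j, s + 1 ≤ j → j < e → pvC kf (j + 1) ≤ pvC kf s + 51) :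
    ((kf.drop s).take (e - s)).foldl pvStepA (L, [], 0)
      = (L, ((kf.drop s).take (e - s)).map pvTag, pvC kf e - pvC kf s - 1) := by
  have hslt : s < kf.length := by omega
  have hCs1 := pvC_succ kf s hslt
  have htake1 : (kf.drop s).take 1 = [kf[s]] := by
    rw [List.take_one, List.head?_drop, List.getElem?_eq_getElem hslt]
    rfl
  have hd : e - s = 1 + (e - s - 1) := by omega
  rw [hd, List.take_add, htake1, List.foldl_append]
  simp only [List.foldl_cons, List.foldl_nil]
  rw [pvStepA_first]
  have hstate : (L, [pvTag kf[s]], PySem.Str.len kf[s].2)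
      = (L, ((kf.drop s).take (s + 1 - s)).map pvTag, pvC kf (s + 1) - pvC kf s - 1) := by
    have hone : s + 1 - s = 1 := by omega
    rw [hone, htake1]
    simp only [List.map_cons, List.map_nil, Prod.mk.injEq]
    exact ⟨trivial, trivial, by omega⟩
  rw [hstate, List.drop_drop]
  have := pvSeg2 kf s L (e - s - 1) (s + 1) (by omega) (by omega)
      (fun j hj1 hj2 => hfit j hj1 (by omega))
  have he1 : s + 1 + (e - s - 1) = e := by omega
  rw [he1] at this
  rw [this, hd, List.take_add, htake1, List.drop_drop]
  have hfix : 1 + (e - s - 1) - 1 = e - s - 1 := by omega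
  rw [hfix]

-- the outer correspondence: finishing A's fold over the suffix from a fresh state
-- yields the already-emitted lines followed by B's wrapped lines from s
theorem pvMain (kf : List (Int × String)) :
    ∀ (fuel s : Nat) (L : List String), kf.length - s ≤ fuel → s ≤ kf.length →
      pvFinish ((kf.drop s).foldl pvStepA (L, [], 0)) = L ++ pvWrapFrom kf (pvCList kf) fuel s := by
  intro fuel
  induction fuel with
  | zero =>
    intro s L hf hsn
    have hs : s = kf.length := by omega
    rw [hs, List.drop_length, List.foldl_nil]
    unfold pvFinish
    simp [pvWrapFrom]
  | succ fuel ih =>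
    intro s L hf hsn
    by_cases hlt : s < kf.length
    · set e := pvBsearch (pvCList kf) ((pvCList kf).getD s 0 + 51) (kf.length - (s + 1)) (s + 1) kf.length with he
      have hele := le_pvBsearch (pvCList kf) ((pvCList kf).getD s 0 + 51) (kf.length - (s + 1)) (s + 1) kf.length
      obtain ⟨heub, hfite, hbreak⟩ :=
        pvBsearch_spec (pvCList kf) ((pvCList kf).getD s 0 + 51) (kf.length - (s + 1)) (s + 1) kf.length
          (by omega) (by omega)
      rw [← he] at hele heub hfite hbreak
      rw [pvCList_getD kf s (by omega)] at hfite hbreak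
      -- unfold B's while-loop once
      have hW : pvWrapFrom kf (pvCList kf) (fuel + 1) s
          = PySem.Str.join " " (((kf.drop s).take (e - s)).map
              (fun p => "{\\kf" ++ PySem.Int.toStr p.1 ++ "}" ++ p.2))
            :: pvWrapFrom kf (pvCList kf) fuel e := by
        rw [pvWrapFrom]
        rw [if_pos hlt, ← he]
      -- the words s..e-1 all fit on one line
      have hfit : ∀ j, s + 1 ≤ j → j < e → pvC kf (j + 1) ≤ pvC kf s + 51 := by
        intro j hj1 hj2
        rcases hfite with hcase | hcase
        · omega
        · rw [pvCList_getD kf e (by omega)] at hcase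
          exact le_trans (pvC_le kf (j + 1) e (by omega) (by omega)) hcase
      -- split the suffix at e
      have hsplit : kf.drop s = (kf.drop s).take (e - s) ++ kf.drop e := by
        have h1 : s + (e - s) = e := by omega
        conv_lhs => rw [← List.take_append_drop (e - s) (kf.drop s)]
        rw [List.drop_drop, h1]
      rw [hsplit, List.foldl_append, pvSegAll kf s e L (by omega) (by omega) hfit]
      have hparts := pvSeg_ne kf s e (by omega) (by omega)
      have hlineeq : PySem.Str.join " " (((kf.drop s).take (e - s)).map pvTag)
          = PySem.Str.join " " (((kf.drop s).take (e - s)).map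
              (fun p => "{\\kf" ++ PySem.Int.toStr p.1 ++ "}" ++ p.2)) := by
        rfl
      by_cases hen : e < kf.length
      · -- next word overflows: A flushes exactly here
        have hbr : pvC kf s + 51 < pvC kf (e + 1) := by
          rcases hbreak with hcase | hcase
          · omega
          · rwa [pvCList_getD kf (e + 1) (by omega)] at hcase
        have hCe1 := pvC_succ kf e hen
        rw [List.drop_eq_getElem_cons hen, List.foldl_cons]
        rw [pvStepA_flush L _ _ _ hparts (by omega)]
        rw [← pvStepA_first (L ++ [PySem.Str.join " " (((kf.drop s).take (e - s)).map pvTag)]) kf[e]]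
        rw [← List.foldl_cons, ← List.drop_eq_getElem_cons hen]
        rw [ih e (L ++ [PySem.Str.join " " (((kf.drop s).take (e - s)).map pvTag)]) (by omega) (by omega)]
        rw [hW, hlineeq, List.append_assoc]
        rfl
      · -- e = n: the remaining words all fit on the final line
        have hen' : e = kf.length := by omega
        rw [hen', List.drop_length, List.foldl_nil]
        unfold pvFinish
        rw [hen'] at hparts
        rw [if_pos hparts]
        rw [hW, hen']
        rw [show pvWrapFrom kf (pvCList kf) fuel kf.length = [] from by
          cases fuel <;> simp [pvWrapFrom]]
        rw [hen'] at hlineeq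
        rw [hlineeq]
    · -- s = n: nothing left, both sides are L
      have hs : s = kf.length := by omega
      rw [hs, List.drop_length, List.foldl_nil]
      unfold pvFinish
      rw [pvWrapFrom, if_neg (by omega : ¬ kf.length < kf.length)]
      simp

-- ===== VERDICT (by name: the statement is the Claim_ definition above) =====
theorem wrap_karaoke_words_py_spec : Claim_equal_wrap_karaoke_words_py := by
  intro kf_words _
  unfold Spec_wrap_karaoke_words_py wrap_karaoke_words_py wrap_karaoke_words_py_alt
  have h := pvMain kf_words kf_words.length 0 [] (by omega) (by omega)
  rw [List.drop_zero] at h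
  simpa [pvFinish] using h
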